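-- pv_equiv track=rewrite | github.com/cfzngcfz/route | route_v1.py | insert0_of_vrp
-- ===== SOURCE A (Python) =====
-- from itertools import permutations,combinations
--
-- def insert0_of_vrp(list_node, num_car):
--     list_solution = []
--     for perm in permutations(list_node, len(list_node)):
--         for comb in combinations([ii+1 for ii in range(len(list_node)-1)],num_car-1):
--             perm2 = list(perm)
--             comb2 = list(comb)
--             comb2.append(len(list_node))
--             solution = []
--             for ii in range(len(comb2)):
--                 if ii == 0:
--                     solution.append(perm2[0:comb2[ii]])
--                 else:
--                     solution.append(perm2[comb2[ii-1]:comb2[ii]])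
--             list_solution.append(solution)
--     return list_solution
-- ===== SOURCE B (Python) =====
-- from itertools import permutations
--
--
-- def insert0_of_vrp(list_node, num_car):
--     def partitions(seq, k):
--         # all splits of seq into exactly k contiguous segments (non-empty
--         # except when k == 1, where the whole seq is the single segment)
--         if k == 1:
--             yield [seq]
--             return
--         for l in range(1, len(seq) - k + 2):
--             head = seq[:l]
--             for rest in partitions(seq[l:], k - 1):
--                 yield [head] + rest
--
--     list_solution = []
--     for perm in permutations(list_node, len(list_node)):
--         for solution in partitions(list(perm), num_car):
--             list_solution.append(solution)
--     return list_solution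
-- ===== Notes on version B (the rewrite author's own statement) =====
-- stated objective: alternative
-- what changed: The inner enumeration of cut-point combinations plus index slicing is replaced by a recursive generator that partitions each permutation directly into num_car contiguous segments (choosing the first-segment length and recursing on the rest), removing the cut-index arithmetic entirely.
import Mathlib
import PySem

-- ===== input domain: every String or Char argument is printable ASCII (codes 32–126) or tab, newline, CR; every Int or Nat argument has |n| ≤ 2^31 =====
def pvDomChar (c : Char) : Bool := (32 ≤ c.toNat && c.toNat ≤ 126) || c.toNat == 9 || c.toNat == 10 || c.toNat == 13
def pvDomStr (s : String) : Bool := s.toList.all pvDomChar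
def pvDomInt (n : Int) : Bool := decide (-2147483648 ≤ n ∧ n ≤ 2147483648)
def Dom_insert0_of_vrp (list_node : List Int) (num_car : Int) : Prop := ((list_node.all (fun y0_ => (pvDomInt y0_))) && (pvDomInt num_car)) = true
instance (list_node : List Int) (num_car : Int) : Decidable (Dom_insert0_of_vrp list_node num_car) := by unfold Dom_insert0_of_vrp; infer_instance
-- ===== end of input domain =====

-- B replaces A's combinations-of-cut-points + index-slicing pass by a recursive partition
-- of each permutation into num_car contiguous segments (objective: alternative decomposition).

-- ===== PORT A =====
-- Literal port of A: for each permutation, for each (num_car-1)-combination of the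
-- inner cut positions [1..n-1], append n, then slice the permutation at the cuts.
-- pyGetD with default 0 is exact here: every index comb2[ii], comb2[ii-1] is in range.
def insert0_of_vrp (list_node : List Int) (num_car : Int) : List (List (List Int)) :=
  (PySem.List.permutations list_node list_node.length).foldl (fun list_solution perm =>
    (PySem.List.combinations
        ((List.range (list_node.length - 1)).map (fun (ii : Nat) => (ii : Int) + 1))
        (num_car - 1).toNat).foldl (fun acc comb =>
      let comb2 : List Int := comb ++ [(list_node.length : Int)]
      let solution : List (List Int) :=
        (List.range comb2.length).foldl (fun sol (ii : Nat) =>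
          if ii == 0 then
            sol ++ [PySem.List.slice perm (some 0) (some (PySem.List.pyGetD comb2 (ii : Int) 0))]
          else
            sol ++ [PySem.List.slice perm (some (PySem.List.pyGetD comb2 ((ii : Int) - 1) 0))
                      (some (PySem.List.pyGetD comb2 (ii : Int) 0))]) []
      acc ++ [solution]) list_solution) []

-- ===== PORT B =====
-- B's recursive helper: all splits of seq into exactly k contiguous segments
-- (non-empty except when k == 1, where the whole seq is the single segment),
-- first-segment length i+1 increasing.  k is the structural fuel (k = 0 unreached for num_car ≥ 1).
def pyPartitions (seq : List Int) : Nat → List (List (List Int))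
  | 0 => []
  | 1 => [[seq]]
  | (k + 2) =>
      (List.range (seq.length - (k + 1))).flatMap (fun i =>
        (pyPartitions (seq.drop (i + 1)) (k + 1)).map (fun rest => seq.take (i + 1) :: rest))

def insert0_of_vrp_alt (list_node : List Int) (num_car : Int) : List (List (List Int)) :=
  (PySem.List.permutations list_node list_node.length).foldl (fun list_solution perm =>
    (pyPartitions perm num_car.toNat).foldl (fun acc solution => acc ++ [solution]) list_solution) []

-- ===== PRECONDITION & SPEC =====
-- Pre_ excludes exactly num_car ≤ 0, where A raises ValueError (combinations with negative r).
def Pre_insert0_of_vrp (list_node : List Int) (num_car : Int) : Prop := 1 ≤ num_car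
instance (list_node : List Int) (num_car : Int) : Decidable (Pre_insert0_of_vrp list_node num_car) := by unfold Pre_insert0_of_vrp; infer_instance
def pvWitness_insert0_of_vrp : List Int × Int := ([1, 2, 3], 2)

def Spec_insert0_of_vrp (list_node : List Int) (num_car : Int) (out : List (List (List Int))) : Prop := out = insert0_of_vrp_alt list_node num_car
instance (list_node : List Int) (num_car : Int) (out : List (List (List Int))) : Decidable (Spec_insert0_of_vrp list_node num_car out) := by unfold Spec_insert0_of_vrp; infer_instance

-- ===== CLAIM (what is proved, stated in full; the proofs are below) =====
def Claim_equal_insert0_of_vrp : Prop := ∀ (list_node : List Int) (num_car : Int), Dom_insert0_of_vrp list_node num_car → Pre_insert0_of_vrp list_node num_car → Spec_insert0_of_vrp list_node num_car (insert0_of_vrp list_node num_car)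

-- ===== LEMMAS AND PROOFS =====

-- Slices of `perm` at an ascending absolute cut list, starting after a previous cut `prev`.
def slicesFrom (perm : List Int) (prev : Nat) : List Nat → List (List Int)
  | [] => []
  | c :: cs => ((perm.drop prev).take (c - prev)) :: slicesFrom perm c cs

-- shift lemma: absolute cuts shifted by l are slices of the dropped list
theorem slicesFrom_shift (perm : List Int) (cuts : List Nat) (l : Nat) :
    ∀ a, slicesFrom perm (a + l) (cuts.map (· + l)) = slicesFrom (perm.drop l) a cuts := by
  induction cuts with
  | nil => intro a; rfl
  | cons c cs ih =>
      intro a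
      simp only [List.map_cons, slicesFrom]
      rw [Nat.add_sub_add_right, Nat.add_comm a l, ← List.drop_drop, ih c]

-- the indexed-segment map (segment i runs from cut i-1, or 0, to cut i) is slicesFrom
theorem segs_core (perm : List Int) (cs : List Nat) :
    ∀ prev, (List.range cs.length).map
        (fun i => ((perm.drop ((prev :: cs).getD i 0)).take (cs.getD i 0 - (prev :: cs).getD i 0)))
      = slicesFrom perm prev cs := by
  induction cs with
  | nil => intro prev; rfl
  | cons c cs ih =>
      intro prev
      simp only [List.length_cons, List.range_succ_eq_map, List.map_cons, List.map_map, slicesFrom]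
      congr 1
      exact ih c

-- A's inner slicing loop computes slicesFrom perm 0 cuts
theorem solA (perm : List Int) (cuts : List Nat) :
    (List.range (cuts.map (Nat.cast : Nat → Int)).length).foldl (fun sol (ii : Nat) =>
        if ii == 0 then
          sol ++ [PySem.List.slice perm (some 0) (some (PySem.List.pyGetD (cuts.map Nat.cast) (ii : Int) 0))]
        else
          sol ++ [PySem.List.slice perm (some (PySem.List.pyGetD (cuts.map Nat.cast) ((ii : Int) - 1) 0))
                    (some (PySem.List.pyGetD (cuts.map Nat.cast) (ii : Int) 0))]) []
      = slicesFrom perm 0 cuts := by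
  rw [List.length_map]
  rw [PySem.List.foldl_congr_mem _ _
    (fun sol (ii : Nat) => sol ++ [if ii == 0 then
          PySem.List.slice perm (some 0) (some (PySem.List.pyGetD (cuts.map Nat.cast) (ii : Int) 0))
        else
          PySem.List.slice perm (some (PySem.List.pyGetD (cuts.map Nat.cast) ((ii : Int) - 1) 0))
                    (some (PySem.List.pyGetD (cuts.map Nat.cast) (ii : Int) 0))]) _
    (by intro acc x _; by_cases h : x == 0 <;> simp [h])]
  rw [PySem.List.foldl_append_singleton_eq_map
        (f := fun ii : Nat => if ii == 0 then
          PySem.List.slice perm (some 0) (some (PySem.List.pyGetD (cuts.map Nat.cast) (ii : Int) 0))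
        else
          PySem.List.slice perm (some (PySem.List.pyGetD (cuts.map Nat.cast) ((ii : Int) - 1) 0))
                    (some (PySem.List.pyGetD (cuts.map Nat.cast) (ii : Int) 0)))
        (l := List.range cuts.length) (acc := []), List.nil_append]
  rw [← segs_core perm cuts 0]
  apply List.map_congr_left
  intro ii _
  have hget : ∀ j : Nat, PySem.List.pyGetD (cuts.map (Nat.cast : Nat → Int)) (j : Int) 0 = (cuts.getD j 0 : Int) := by
    intro j
    rw [show (0 : Int) = ((0 : Nat) : Int) from rfl, PySem.List.pyGetD_map, PySem.List.pyGetD_natCast]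
  cases ii with
  | zero =>
      rw [if_pos (by simp), hget 0, PySem.List.slice_zero_start, PySem.List.slice_to_natCast]
      simp
  | succ j =>
      rw [if_neg (by simp)]
      have hc : ((j + 1 : Nat) : Int) - 1 = ((j : Nat) : Int) := by push_cast; ring
      rw [hc, hget, hget, PySem.List.slice_natCast]
      simp [List.getD_cons_succ]

-- flatMap over a range ignores a tail of empty results
theorem flatMap_range_trunc {β : Type} (m m' : Nat) (f : Nat → List β) (h : m' ≤ m)
    (h2 : ∀ i, m' ≤ i → i < m → f i = []) :
    (List.range m).flatMap f = (List.range m').flatMap f := by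
  obtain ⟨d, rfl⟩ := Nat.exists_eq_add_of_le h
  rw [List.range_add, List.flatMap_append]
  have : (List.map (fun x => m' + x) (List.range d)).flatMap f = [] := by
    simp only [List.flatMap_eq_nil_iff]
    intro x hx
    simp only [List.mem_map, List.mem_range] at hx
    obtain ⟨i, hi, rfl⟩ := hx
    exact h2 _ (Nat.le_add_right _ _) (by omega)
  rw [this, List.append_nil]

-- first-element decomposition of combinations of an arithmetic ladder
theorem combRange (r : Nat) : ∀ (n s : Nat),
    PySem.List.combinations (List.range' s n) (r + 1)
      = (List.range n).flatMap (fun i =>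
          (PySem.List.combinations (List.range' (s + i + 1) (n - i - 1)) r).map ((s + i) :: ·)) := by
  intro n
  induction n with
  | zero => intro s; simp [PySem.List.combinations_nil_succ]
  | succ n ih =>
      intro s
      rw [List.range'_succ, PySem.List.combinations_cons_succ, ih (s + 1),
        List.range_succ_eq_map, List.flatMap_cons, List.flatMap_map]
      congr 1
      apply List.flatMap_congr
      intro i _
      have e1 : s + 1 + i = s + i.succ := by omega
      have e2 : n - i - 1 = n + 1 - i.succ - 1 := by omega
      rw [e1, e2]

-- core: A's per-permutation slicing over all cut combinations is B's partitions
theorem core (r : Nat) : ∀ (perm : List Int),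
    (PySem.List.combinations (List.range' 1 (perm.length - 1)) r).map
        (fun cn => slicesFrom perm 0 (cn ++ [perm.length]))
      = pyPartitions perm (r + 1) := by
  induction r with
  | zero =>
      intro perm
      simp [PySem.List.combinations_zero, pyPartitions, slicesFrom]
  | succ r ih =>
      intro perm
      rw [combRange r (perm.length - 1) 1, List.map_flatMap]
      rw [show pyPartitions perm (r + 1 + 1) = (List.range (perm.length - (r + 1))).flatMap (fun i =>
        (pyPartitions (perm.drop (i + 1)) (r + 1)).map (fun rest => perm.take (i + 1) :: rest)) from rfl]
      rw [flatMap_range_trunc (perm.length - 1) (perm.length - (r + 1)) _ (by omega)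
        (by
          intro i h1 h2
          rw [PySem.List.combinations_eq_nil_of_length_lt]
          · simp
          · rw [List.length_range']; omega)]
      apply List.flatMap_congr
      intro i hi
      rw [List.mem_range] at hi
      have hin : i + 1 ≤ perm.length := by omega
      have hr : List.range' (1 + i + 1) (perm.length - 1 - i - 1)
          = (List.range' 1 (perm.length - (i + 1) - 1)).map (fun x => (i + 1) + x) := by
        rw [List.map_add_range']
        congr 1 <;> omega
      rw [hr, PySem.List.combinations_map, List.map_map, List.map_map]
      have hlen : (perm.drop (i + 1)).length = perm.length - (i + 1) := by
        simp
      rw [← ih (perm.drop (i + 1)), hlen, List.map_map]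
      apply List.map_congr_left
      intro t _
      simp only [Function.comp_apply]
      have hsplit : (1 + i) :: (t.map (fun x => (i + 1) + x)) ++ [perm.length]
          = (1 + i) :: ((t ++ [perm.length - (i + 1)]).map (fun x => x + (i + 1))) := by
        have hm : List.map (fun x => (i + 1) + x) t = List.map (fun x => x + (i + 1)) t :=
          List.map_congr_left (fun x _ => by omega)
        have hn : perm.length - (i + 1) + (i + 1) = perm.length := by omega
        simp only [List.map_append, List.map_cons, List.map_nil]
        rw [hm, hn]; simp
      rw [hsplit]
      show slicesFrom perm 0 _ = _
      rw [show slicesFrom perm 0 ((1 + i) :: ((t ++ [perm.length - (i + 1)]).map (fun x => x + (i + 1))))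
          = (perm.drop 0).take ((1 + i) - 0) :: slicesFrom perm (1 + i) ((t ++ [perm.length - (i + 1)]).map (fun x => x + (i + 1))) from rfl]
      rw [show (1 : Nat) + i = 0 + (i + 1) by omega]
      rw [slicesFrom_shift]
      simp

-- A's whole inner loop (for one permutation) equals B's pyPartitions, with the accumulator
theorem innerA_eq (perm : List Int) (r : Nat) (acc : List (List (List Int))) :
    (PySem.List.combinations ((List.range (perm.length - 1)).map (fun (ii : Nat) => (ii : Int) + 1)) r).foldl
      (fun acc comb =>
        let comb2 : List Int := comb ++ [(perm.length : Int)]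
        let solution : List (List Int) :=
          (List.range comb2.length).foldl (fun sol (ii : Nat) =>
            if ii == 0 then
              sol ++ [PySem.List.slice perm (some 0) (some (PySem.List.pyGetD comb2 (ii : Int) 0))]
            else
              sol ++ [PySem.List.slice perm (some (PySem.List.pyGetD comb2 ((ii : Int) - 1) 0))
                        (some (PySem.List.pyGetD comb2 (ii : Int) 0))]) []
        acc ++ [solution]) acc
    = acc ++ pyPartitions perm (r + 1) := by
  have h1 : (List.range (perm.length - 1)).map (fun (ii : Nat) => (ii : Int) + 1)
      = (List.range' 1 (perm.length - 1)).map (Nat.cast : Nat → Int) := by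
    rw [List.range'_eq_map_range, List.map_map]
    apply List.map_congr_left
    intro x _
    simp only [Function.comp_apply]
    push_cast
    ring
  rw [h1, PySem.List.combinations_map, List.foldl_map]
  rw [PySem.List.foldl_congr_mem _ _
    (fun acc cn => acc ++ [slicesFrom perm 0 (cn ++ [perm.length])]) _
    (by
      intro a cn _
      simp only []
      congr 1
      have h2 : (cn.map (Nat.cast : Nat → Int)) ++ [(perm.length : Int)]
          = (cn ++ [perm.length]).map (Nat.cast : Nat → Int) := by
        simp
      rw [h2]
      rw [solA perm (cn ++ [perm.length])])]
  rw [PySem.List.foldl_append_singleton_eq_map, core r perm]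

-- ===== VERDICT (by name: the statement is the Claim_ definition above) =====
theorem insert0_of_vrp_spec : Claim_equal_insert0_of_vrp := by
  intro list_node num_car _ hpre
  have hnum : 1 ≤ num_car := hpre
  unfold Spec_insert0_of_vrp insert0_of_vrp insert0_of_vrp_alt
  apply PySem.List.foldl_congr_mem
  intro acc perm hperm
  have hlen : perm.length = list_node.length :=
    (PySem.List.perm_of_mem_permutations hperm).length_eq
  have hN : num_car.toNat = (num_car - 1).toNat + 1 := by omega
  rw [PySem.List.foldl_append_singleton_eq_self, hN, ← hlen, innerA_eq]
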